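-- pv_equiv track=rewrite | github.com/microsoft/muzic | deeprapper/prepare_train_data.py | get_beat_token
-- ===== SOURCE A (Python) =====
-- def get_beat_token(cnt, line):
--     lines = line.split()
--     beat = ['0'] * len(lines)
--     for idx, item in enumerate(lines):
--         if item == '[BEAT]':
--             cnt += 1
--             beat[idx] = str(cnt)
--     beat = ' '.join(beat) + ' '
--     return cnt, beat
-- ===== SOURCE B (Python) =====
-- def get_beat_token(cnt, line):
--     words = line.split()
--     mask = [w == '[BEAT]' for w in words]
--     prefix = []
--     s = 0
--     for m in mask:
--         s += m
--         prefix.append(s)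
--     beat = [str(cnt + p) if m else '0' for m, p in zip(mask, prefix)]
--     return cnt + sum(mask), ' '.join(beat) + ' '
-- ===== Notes on version B (the rewrite author's own statement) =====
-- stated objective: alternative
-- what changed: Replaced A's single loop that mutates a counter and writes into a preallocated '0' list with a three-pass decomposition: build a boolean beat mask, compute its running prefix sums, then label each token by a zip comprehension and add the mask's sum to cnt.
import Mathlib
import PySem

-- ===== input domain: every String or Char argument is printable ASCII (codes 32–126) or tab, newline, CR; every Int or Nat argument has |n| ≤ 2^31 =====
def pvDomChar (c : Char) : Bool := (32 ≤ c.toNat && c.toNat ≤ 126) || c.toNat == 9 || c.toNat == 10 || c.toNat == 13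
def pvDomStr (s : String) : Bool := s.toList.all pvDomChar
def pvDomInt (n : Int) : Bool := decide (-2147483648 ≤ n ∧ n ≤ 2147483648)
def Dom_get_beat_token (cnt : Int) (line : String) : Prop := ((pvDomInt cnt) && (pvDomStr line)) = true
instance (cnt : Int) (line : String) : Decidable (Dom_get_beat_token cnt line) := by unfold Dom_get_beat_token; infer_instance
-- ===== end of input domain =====

-- B replaces A's single mutating-counter loop by a three-pass decomposition (beat mask,
-- prefix sums of the mask, zip-comprehension labeling); objective: alternative, same cost.


-- ===== PORT A =====
-- loop 'for idx, item in enumerate(lines): if item == "[BEAT]": cnt += 1; beat[idx] = str(cnt)'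
def get_beat_token (cnt : Int) (line : String) : Int × String :=
  let lines := PySem.Str.split₀ line
  let st := (PySem.List.enumerate lines 0).foldl
    (fun (st : Int × List String) (p : Int × String) =>
      if p.2 == "[BEAT]" then
        (st.1 + 1, PySem.List.pySetD st.2 p.1 (PySem.Int.toStr (st.1 + 1)))
      else st)
    (cnt, List.replicate lines.length "0")
  (st.1, PySem.Str.join " " st.2 ++ " ")

-- ===== PORT B =====
def get_beat_token_alt (cnt : Int) (line : String) : Int × String :=
  let words := PySem.Str.split₀ line
  let mask := words.map (fun w => w == "[BEAT]")
  -- prefix sums of the mask: 's = 0; for m in mask: s += m; prefix.append(s)'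
  let pre := mask.foldl
    (fun (st : Int × List Int) (m : Bool) =>
      ((st.1 + if m then 1 else 0), st.2 ++ [st.1 + if m then 1 else 0]))
    (0, [])
  let beat := (mask.zip pre.2).map
    (fun (p : Bool × Int) => if p.1 then PySem.Int.toStr (cnt + p.2) else "0")
  (cnt + (mask.map (fun m => if m then (1 : Int) else 0)).sum,
   PySem.Str.join " " beat ++ " ")

-- ===== PRECONDITION & SPEC =====
def Spec_get_beat_token (cnt : Int) (line : String) (out : Int × String) : Prop := out = get_beat_token_alt cnt line
instance (cnt : Int) (line : String) (out : Int × String) : Decidable (Spec_get_beat_token cnt line out) := by unfold Spec_get_beat_token; infer_instance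

-- ===== CLAIM (what is proved, stated in full; the proofs are below) =====
def Claim_equal_get_beat_token : Prop := ∀ (cnt : Int) (line : String), Dom_get_beat_token cnt line → Spec_get_beat_token cnt line (get_beat_token cnt line)

-- ===== LEMMAS AND PROOFS =====

-- running-counter labels: what both programs put at each position
def pvLabels (c : Int) : List String → List String
  | [] => []
  | w :: ws =>
    if w == "[BEAT]" then PySem.Int.toStr (c + 1) :: pvLabels (c + 1) ws
    else "0" :: pvLabels c ws

def pvCount : List String → Int
  | [] => 0
  | w :: ws => (if w == "[BEAT]" then 1 else 0) + pvCount ws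

-- A's fold over enumerate, started after a finished prefix `done`
theorem pvA_fold (ws : List String) : ∀ (done : List String) (c : Int),
    (PySem.List.enumerate ws (done.length : Int)).foldl
      (fun (st : Int × List String) (p : Int × String) =>
        if p.2 == "[BEAT]" then
          (st.1 + 1, PySem.List.pySetD st.2 p.1 (PySem.Int.toStr (st.1 + 1)))
        else st)
      (c, done ++ List.replicate ws.length "0")
    = (c + pvCount ws, done ++ pvLabels c ws) := by
  induction ws with
  | nil => intro done c; simp [PySem.List.enumerate_nil, pvCount, pvLabels]
  | cons w ws ih =>
    intro done c
    rw [PySem.List.enumerate_cons]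
    simp only [List.foldl_cons, List.length_cons, List.replicate_succ]
    by_cases hw : w == "[BEAT]"
    · simp only [hw, if_pos]
      have hset : PySem.List.pySetD (done ++ "0" :: List.replicate ws.length "0")
          ((done.length : Int)) (PySem.Int.toStr (c + 1))
          = (done ++ [PySem.Int.toStr (c + 1)]) ++ List.replicate ws.length "0" := by
        rw [PySem.List.pySetD_natCast]
        rw [List.set_append_right _ _ (Nat.le_refl _)]
        simp
      rw [hset]
      have hlen : ((done.length : Int) + 1) = (((done ++ [PySem.Int.toStr (c + 1)]).length : Nat) : Int) := by
        simp
      rw [hlen, ih]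
      simp [pvCount, pvLabels, hw]
      omega
    · simp only [hw, if_neg, Bool.false_eq_true, not_false_iff]
      have hlen : ((done.length : Int) + 1) = (((done ++ ["0"]).length : Nat) : Int) := by simp
      have : done ++ "0" :: List.replicate ws.length "0"
           = (done ++ ["0"]) ++ List.replicate ws.length "0" := by simp
      rw [this, hlen, ih]
      simp [pvCount, pvLabels, hw]

-- B's prefix-sum fold: final sum and the accumulated prefix list
def pvScan (t : Int) : List Bool → List Int
  | [] => []
  | m :: ms => (t + if m then 1 else 0) :: pvScan (t + if m then 1 else 0) ms

theorem pvB_fold (ms : List Bool) : ∀ (t : Int) (acc : List Int),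
    ms.foldl
      (fun (st : Int × List Int) (m : Bool) =>
        ((st.1 + if m then 1 else 0), st.2 ++ [st.1 + if m then 1 else 0]))
      (t, acc)
    = (t + (ms.map (fun m => if m then (1 : Int) else 0)).sum, acc ++ pvScan t ms) := by
  induction ms with
  | nil => intro t acc; simp [pvScan]
  | cons m ms ih =>
    intro t acc
    simp only [List.foldl_cons, ih, pvScan, List.map_cons, List.sum_cons, Prod.mk.injEq]
    constructor
    · ring
    · simp

theorem pvB_labels (ws : List String) : ∀ (c t : Int),
    ((ws.map (fun w => w == "[BEAT]")).zip (pvScan t (ws.map (fun w => w == "[BEAT]")))).map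
      (fun (p : Bool × Int) => if p.1 then PySem.Int.toStr (c + p.2) else "0")
    = pvLabels (c + t) ws := by
  induction ws with
  | nil => intro c t; simp [pvLabels]
  | cons w ws ih =>
    intro c t
    simp only [List.map_cons, pvScan, List.zip_cons_cons, List.map_cons]
    by_cases hw : w == "[BEAT]"
    · simp only [hw, if_pos, pvLabels]
      rw [ih c (t + 1), show c + (t + 1) = c + t + 1 from by ring]
    · simp only [hw, Bool.false_eq_true, if_neg, not_false_iff, pvLabels]
      rw [ih c (t + 0)]
      simp

theorem pvCount_eq (ws : List String) :
    ((ws.map (fun w => w == "[BEAT]")).map (fun m => if m then (1 : Int) else 0)).sum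
    = pvCount ws := by
  induction ws with
  | nil => simp [pvCount]
  | cons w ws ih =>
    simp only [List.map_map] at ih
    simp only [List.map_cons, List.sum_cons, List.map_map, pvCount, ih]

-- ===== VERDICT (by name: the statement is the Claim_ definition above) =====
theorem get_beat_token_spec : Claim_equal_get_beat_token := by
  unfold Claim_equal_get_beat_token Spec_get_beat_token
  intro cnt line _
  unfold get_beat_token get_beat_token_alt
  simp only []
  have hA := pvA_fold (PySem.Str.split₀ line) [] cnt
  simp only [List.length_nil, Nat.cast_zero, List.nil_append] at hA
  rw [hA]
  rw [pvB_fold]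
  simp only [List.nil_append]
  have hB := pvB_labels (PySem.Str.split₀ line) cnt 0
  rw [hB]
  rw [pvCount_eq]
  simp
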